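-- pv_equiv track=rewrite | github.com/ThenTech/BDA-Assignments | Plagiarism/Resources/submissions/submissions/2294307.py | unique_test
-- ===== SOURCE A (Python) =====
-- def unique_test(matrix):
--     test_list = []
--     for colum in matrix:
--         for n in colum:
--             test_list.append(n)
--     for q in range(len(test_list)):
--         if test_list[q] in test_list[q+1:]:
--             return False
--     return True
-- ===== SOURCE B (Python) =====
-- def unique_test(matrix):
--     flat = [n for row in matrix for n in row]
--     s = sorted(flat)
--     return all(x != y for x, y in zip(s, s[1:]))
-- ===== Notes on version B (the rewrite author's own statement) =====
-- stated objective: simpler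
-- what changed: Replaces A's per-element membership rescan of the remaining suffix with flatten + sorted() + a single adjacent-equality pass over the sorted list.
import Mathlib
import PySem

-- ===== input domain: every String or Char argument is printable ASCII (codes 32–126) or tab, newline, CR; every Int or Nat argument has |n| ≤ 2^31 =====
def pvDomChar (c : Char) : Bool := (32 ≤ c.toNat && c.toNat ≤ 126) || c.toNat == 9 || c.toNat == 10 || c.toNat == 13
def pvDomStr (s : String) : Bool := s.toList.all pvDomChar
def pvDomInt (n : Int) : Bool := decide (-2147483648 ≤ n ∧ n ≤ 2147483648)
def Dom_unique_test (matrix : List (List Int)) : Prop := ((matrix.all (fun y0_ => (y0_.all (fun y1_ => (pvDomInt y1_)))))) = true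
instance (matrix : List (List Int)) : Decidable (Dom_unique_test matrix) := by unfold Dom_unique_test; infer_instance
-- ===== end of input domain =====

-- B replaces A's per-element suffix-membership rescans by flatten + sort + one adjacent-equality pass (objective: simpler).

-- ===== PORT A =====
-- the 'for q in range(len(test_list)): if test_list[q] in test_list[q+1:]: return False' loop
def uniqueLoop (tl : List Int) : List Int → Bool
  | [] => true
  | q :: qs =>
    if (PySem.List.slice tl (some (q + 1)) none).contains (PySem.List.pyGetD tl q 0) then false
    else uniqueLoop tl qs

def unique_test (matrix : List (List Int)) : Bool :=
  let test_list := matrix.foldl (fun acc colum => colum.foldl (fun acc n => acc ++ [n]) acc) []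
  uniqueLoop test_list (PySem.List.pyRange 0 (PySem.List.len test_list) 1)

-- ===== PORT B =====
def unique_test_alt (matrix : List (List Int)) : Bool :=
  let flat := matrix.flatMap (fun row => row.map (fun n => n))
  let s := PySem.List.sorted flat (fun x => x) false
  (s.zip (PySem.List.slice s (some 1) none)).all (fun p => decide (p.1 ≠ p.2))

-- ===== PRECONDITION & SPEC =====
def Spec_unique_test (matrix : List (List Int)) (out : Bool) : Prop := out = unique_test_alt matrix
instance (matrix : List (List Int)) (out : Bool) : Decidable (Spec_unique_test matrix out) := by unfold Spec_unique_test; infer_instance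

-- ===== CLAIM (what is proved, stated in full; the proofs are below) =====
def Claim_equal_unique_test : Prop := ∀ (matrix : List (List Int)), Dom_unique_test matrix → Spec_unique_test matrix (unique_test matrix)

-- ===== LEMMAS AND PROOFS =====

-- A's double append loop builds the flattened matrix
lemma buildA (matrix : List (List Int)) (acc : List Int) :
    matrix.foldl (fun acc colum => colum.foldl (fun acc n => acc ++ [n]) acc) acc
      = acc ++ matrix.flatten := by
  induction matrix generalizing acc with
  | nil => simp
  | cons c t ih =>
    rw [List.foldl_cons, PySem.List.foldl_append_singleton, ih]
    simp

-- A's early-return loop is an 'all' over the index list (no state crosses iterations)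
lemma loop_eq_all (tl : List Int) (qs : List Int) :
    uniqueLoop tl qs
      = qs.all (fun q => !((PySem.List.slice tl (some (q + 1)) none).contains (PySem.List.pyGetD tl q 0))) := by
  induction qs with
  | nil => rfl
  | cons q qs ih =>
    simp only [uniqueLoop, ih, List.all_cons]
    cases h : (PySem.List.slice tl (some (q + 1)) none).contains (PySem.List.pyGetD tl q 0) <;>
      simp

-- A returns true exactly on duplicate-free flattened lists
lemma loopA_iff_nodup (tl : List Int) :
    uniqueLoop tl (PySem.List.pyRange 0 (PySem.List.len tl) 1) = true ↔ tl.Nodup := by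
  rw [loop_eq_all]
  rw [show PySem.List.len tl = ((tl.length : Int)) from by simp [PySem.List.len_eq]]
  rw [PySem.List.pyRange_zero_natCast]
  simp only [List.all_map, List.all_eq_true, List.mem_range, Function.comp,
    Bool.not_eq_eq_eq_not, Bool.not_true]
  constructor
  · intro h
    rw [List.nodup_iff_getElem?_ne_getElem?]
    intro i j hij hj hEq
    have hi : i < tl.length := lt_trans hij hj
    have h' := h i hi
    rw [show ((i : Int) + 1) = ((i + 1 : Nat) : Int) from by push_cast; ring,
      PySem.List.slice_from_natCast, PySem.List.pyGetD_natCast] at h'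
    rw [List.getElem?_eq_getElem hi, List.getElem?_eq_getElem hj] at hEq
    have hEq' : tl[i] = tl[j] := Option.some_inj.mp hEq
    have hmem : tl[i] ∈ tl.drop (i + 1) := by
      rw [List.mem_iff_getElem]
      refine ⟨j - (i + 1), by rw [List.length_drop]; omega, ?_⟩
      rw [List.getElem_drop]
      have hji : i + 1 + (j - (i + 1)) = j := by omega
      simp only [hji]
      exact hEq'.symm
    have h'' : tl[i] ∉ tl.drop (i + 1) := by
      rw [List.getD_eq_getElem tl 0 hi] at h'
      simpa using h'
    exact h'' hmem
  · intro hnd k hk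
    rw [show ((k : Int) + 1) = ((k + 1 : Nat) : Int) from by push_cast; ring,
      PySem.List.slice_from_natCast, PySem.List.pyGetD_natCast]
    rw [List.getD_eq_getElem tl 0 hk]
    simp only [List.contains_eq_mem, decide_eq_false_iff_not]
    intro hmem
    rw [List.mem_iff_getElem] at hmem
    obtain ⟨i, hi, hgi⟩ := hmem
    rw [List.getElem_drop] at hgi
    have hb : k + 1 + i < tl.length := by
      rw [List.length_drop] at hi; omega
    have := List.nodup_iff_getElem?_ne_getElem?.mp hnd k (k + 1 + i) (by omega) hb
    rw [List.getElem?_eq_getElem hk, List.getElem?_eq_getElem hb] at this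
    exact this (by rw [hgi])

-- zip-with-tail 'all distinct' is the adjacent-distinct chain
lemma zip_all_ne_iff (l : List Int) :
    ((l.zip l.tail).all fun p => decide (p.1 ≠ p.2)) = true ↔ l.IsChain (· ≠ ·) := by
  induction l with
  | nil => simp
  | cons a t ih =>
    cases t with
    | nil => simp
    | cons b t' =>
      simp only [List.tail_cons, List.zip_cons_cons, List.all_cons, Bool.and_eq_true,
        decide_eq_true_eq, List.isChain_cons_cons]
      rw [← ih]
      simp [List.tail_cons]

-- on a ≤-sorted list, adjacent-distinct ⟺ duplicate-free
lemma sorted_chain_ne_iff_nodup (l : List Int) (hp : l.Pairwise (· ≤ ·)) :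
    l.IsChain (· ≠ ·) ↔ l.Nodup := by
  constructor
  · intro hc
    have hlt : l.IsChain (· < ·) := by
      rw [List.isChain_iff_getElem] at hc ⊢
      intro i h
      have hle : l[i] ≤ l[i + 1] :=
        List.pairwise_iff_getElem.mp hp i (i + 1) (by omega) h (by omega)
      exact lt_of_le_of_ne hle (hc i h)
    have hplt : l.Pairwise (· < ·) := List.isChain_iff_pairwise.mp hlt
    exact hplt.imp (fun h => ne_of_lt h)
  · intro hnd
    exact List.Pairwise.isChain hnd

-- the two verdict values agree: both are 'flattened matrix has no duplicates'
lemma main_eq (matrix : List (List Int)) : unique_test matrix = unique_test_alt matrix := by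
  have hflat : matrix.flatMap (fun row => row.map (fun n => n)) = matrix.flatten := by
    simp [List.flatMap]
  unfold unique_test unique_test_alt
  simp only [buildA, List.nil_append, hflat, PySem.List.slice_from_one]
  set s := PySem.List.sorted matrix.flatten (fun x => x) false with hs
  have hperm : s.Perm matrix.flatten := PySem.List.sorted_perm _ _ _
  have hA := loopA_iff_nodup matrix.flatten
  have hB : ((s.zip s.tail).all fun p => decide (p.1 ≠ p.2)) = true ↔ matrix.flatten.Nodup := by
    rw [zip_all_ne_iff, sorted_chain_ne_iff_nodup s (PySem.List.sorted_pairwise _ _)]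
    exact hperm.nodup_iff
  cases h : uniqueLoop matrix.flatten (PySem.List.pyRange 0 (PySem.List.len matrix.flatten) 1) with
  | true => exact (hB.mpr (hA.mp h)).symm
  | false =>
    by_contra hne
    have : ((s.zip s.tail).all fun p => decide (p.1 ≠ p.2)) = true := by
      cases hb : (s.zip s.tail).all fun p => decide (p.1 ≠ p.2)
      · exact absurd (hb ▸ hne) (by simp)
      · rfl
    have := hA.mpr (hB.mp this)
    rw [h] at this; exact Bool.false_ne_true this

-- ===== VERDICT (by name: the statement is the Claim_ definition above) =====
theorem unique_test_spec : Claim_equal_unique_test := by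
  intro matrix _
  exact main_eq matrix
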